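-- pv_equiv track=rewrite | github.com/jvs/tmux-supertree | tmux_supertree/main.py | _apply_fuzzy_markup
-- ===== SOURCE A (Python) =====
-- def _is_fuzzy_match(search_term, name):
--     if not search_term:
--         return True
--
--     search_term = search_term.lower()
--     name = name.lower()
--     if not search_term:
--         return True
--
--     i = 0
--
--     for char in name:
--         # If current character matches the current character in search_term
--         if char == search_term[i]:
--             # Move to next character in search_term.
--             i += 1
--
--             # Have we matched all characters in search_term?
--             if i == len(search_term):
--                 return True
--
--     # If we've gone through all of name without matching all of search_term.
--     return False
--
-- def _apply_fuzzy_markup(search_term, parent_name, name):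
--     if not search_term:
--         return name
--
--     if "/" in search_term:
--         parent_search_term, search_term = search_term.split("/", 1)
--     else:
--         parent_search_term = None
--
--     if parent_name and parent_search_term:
--         if not _is_fuzzy_match(parent_search_term, parent_name):
--             return None
--
--     i = 0
--     search_term = search_term.lower().replace(" ", "")
--
--     result = []
--     num_matches = 0
--
--     for char in name:
--         is_match = len(search_term) > i and char.lower() == search_term[i]
--
--         if is_match:
--             char = f"[underline bold]{char}[/]"
--             num_matches += 1
--             i += 1
--
--         result.append(char)
--
--     if num_matches == len(search_term):
--         return "".join(result)
--     else:
--         return None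
-- ===== SOURCE B (Python) =====
-- def _matches(search_term, name):
--     # case-insensitive subsequence test
--     it = iter(name.lower())
--     return all(c in it for c in search_term.lower())
--
-- def _apply_fuzzy_markup(search_term, parent_name, name):
--     if not search_term:
--         return name
--
--     if "/" in search_term:
--         parent_search_term, search_term = search_term.split("/", 1)
--         if parent_name and parent_search_term and not _matches(parent_search_term, parent_name):
--             return None
--
--     needle = search_term.lower().replace(" ", "")
--
--     # pass 1: greedily collect the indices of name that advance the needle
--     hits = []
--     for idx, char in enumerate(name):
--         if len(hits) < len(needle) and char.lower() == needle[len(hits)]: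
--             hits.append(idx)
--
--     if len(hits) != len(needle):
--         return None
--
--     # pass 2: render, wrapping exactly the collected indices
--     hit_set = set(hits)
--     return "".join(
--         f"[underline bold]{c}[/]" if j in hit_set else c
--         for j, c in enumerate(name)
--     )
-- ===== Notes on version B (the rewrite author's own statement) =====
-- stated objective: alternative
-- what changed: B replaces A's single mutate-as-you-go loop (pointer, match counter and result list updated together) by a collect-then-render decomposition: one greedy pass gathers the set of matched indices, a length check replaces the counter, and a second enumerate pass wraps exactly those indices; the parent guard uses an iterator-based all(c in it) subsequence test instead of A's indexed loop.
import Mathlib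
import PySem

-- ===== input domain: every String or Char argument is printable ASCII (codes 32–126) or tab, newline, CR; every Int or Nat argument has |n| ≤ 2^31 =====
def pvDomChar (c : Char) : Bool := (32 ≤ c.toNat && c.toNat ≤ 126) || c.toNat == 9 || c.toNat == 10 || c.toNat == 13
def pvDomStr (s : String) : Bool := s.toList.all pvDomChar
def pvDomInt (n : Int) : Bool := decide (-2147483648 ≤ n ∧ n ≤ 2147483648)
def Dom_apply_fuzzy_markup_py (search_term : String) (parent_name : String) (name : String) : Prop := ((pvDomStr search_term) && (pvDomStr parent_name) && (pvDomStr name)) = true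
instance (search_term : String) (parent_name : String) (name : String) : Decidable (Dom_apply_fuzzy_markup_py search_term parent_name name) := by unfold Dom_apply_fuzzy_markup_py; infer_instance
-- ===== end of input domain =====

-- B collects the greedy match indices in one pass and renders the markup in a second,
-- differently-shaped pass; objective: alternative decomposition (same cost).

-- ===== PORT A =====
def pvMarkupA (c : Char) : List Char :=
  "[underline bold]".toList ++ [c] ++ "[/]".toList

-- the for-loop of _is_fuzzy_match: pointer i into st, early return True at i == len(st)
def pvFuzzyLoopA (st : List Char) : List Char → Nat → Bool
  | [], _ => false
  | c :: rest, i =>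
    if st[i]? = some c then
      (if i + 1 = st.length then true else pvFuzzyLoopA st rest (i + 1))
    else pvFuzzyLoopA st rest i

def is_fuzzy_match_py (search_term : List Char) (nm : List Char) : Bool :=
  if search_term.isEmpty then true
  else
    let s := PySem.Chars.lower search_term
    let n := PySem.Chars.lower nm
    if s.isEmpty then true
    else pvFuzzyLoopA s n 0

-- the main for-loop of _apply_fuzzy_markup: state (i, num_matches, result)
def pvMarkLoopA (st : List Char) : List Char → Nat → Nat → List (List Char) → (List (List Char) × Nat)
  | [], _, n, res => (res, n)
  | c :: rest, i, n, res =>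
    if st[i]? = some (PySem.Chars.lowerChar c) then
      pvMarkLoopA st rest (i + 1) (n + 1) (res ++ [pvMarkupA c])
    else
      pvMarkLoopA st rest i n (res ++ [[c]])

def apply_fuzzy_markup_py (search_term : String) (parent_name : String) (name : String) : Option String :=
  if search_term.toList = [] then some name
  else
    let split : Option (List Char) × List Char :=
      if PySem.Chars.isIn ['/'] search_term.toList then
        match PySem.Chars.splitMax? search_term.toList ['/'] 1 with
        | some (p :: s :: _) => (some p, s)
        | _ => (none, search_term.toList)   -- unreachable: split("/",1) yields two pieces here
      else (none, search_term.toList)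
    let g : Bool :=
      match split.1 with
      | some p => !parent_name.toList.isEmpty && !p.isEmpty && !(is_fuzzy_match_py p parent_name.toList)
      | none => false
    if g then none
    else
      let st := PySem.Chars.replace (PySem.Chars.lower split.2) [' '] []
      let r := pvMarkLoopA st name.toList 0 0 []
      if r.2 = st.length then some (String.ofList (PySem.Chars.join [] r.1)) else none

-- ===== PORT B =====
-- 'c in it': consume the iterator until c is found
def pvConsume (c : Char) : List Char → Option (List Char)
  | [] => none
  | x :: xs => if x = c then some xs else pvConsume c xs

-- all(c in it for c in st) over the iterator of nm
def pvMatchesB : List Char → List Char → Bool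
  | [], _ => true
  | c :: cs, nm =>
    match pvConsume c nm with
    | none => false
    | some rest => pvMatchesB cs rest

def matches_b (st nm : List Char) : Bool :=
  pvMatchesB (PySem.Chars.lower st) (PySem.Chars.lower nm)

-- pass 1: collect the indices that advance the needle (pointer = hits.length)
def pvCollectB (needle : List Char) : List Char → Int → List Int → List Int
  | [], _, acc => acc
  | c :: rest, idx, acc =>
    if needle[acc.length]? = some (PySem.Chars.lowerChar c) then
      pvCollectB needle rest (idx + 1) (acc ++ [idx])
    else
      pvCollectB needle rest (idx + 1) acc

def pvCoreB (st nm : List Char) : Option String :=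
  let needle := PySem.Chars.replace (PySem.Chars.lower st) [' '] []
  let hits := pvCollectB needle nm 0 []
  if hits.length = needle.length then
    let hitSet := PySem.Set.ofList hits
    some (String.ofList (PySem.Chars.join []
      ((PySem.List.enumerate nm 0).map
        (fun p => if PySem.Set.contains hitSet p.1 then "[underline bold]".toList ++ [p.2] ++ "[/]".toList else [p.2]))))
  else none

def apply_fuzzy_markup_py_alt (search_term : String) (parent_name : String) (name : String) : Option String :=
  if search_term.toList = [] then some name
  else if PySem.Chars.isIn ['/'] search_term.toList then
    -- the branches for none / fewer than two pieces are unreachable: split("/",1) yields two pieces here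
    match PySem.Chars.splitMax? search_term.toList ['/'] 1 with
    | none => pvCoreB search_term.toList name.toList
    | some [] => pvCoreB search_term.toList name.toList
    | some (p :: rest) =>
      match rest with
      | [] => pvCoreB search_term.toList name.toList
      | s :: _ =>
        if !parent_name.toList.isEmpty && !p.isEmpty && !(matches_b p parent_name.toList) then none
        else pvCoreB s name.toList
  else pvCoreB search_term.toList name.toList

-- ===== PRECONDITION & SPEC =====
def Spec_apply_fuzzy_markup_py (search_term : String) (parent_name : String) (name : String) (out : Option String) : Prop := out = apply_fuzzy_markup_py_alt search_term parent_name name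
instance (search_term : String) (parent_name : String) (name : String) (out : Option String) : Decidable (Spec_apply_fuzzy_markup_py search_term parent_name name out) := by unfold Spec_apply_fuzzy_markup_py; infer_instance

-- ===== CLAIM (what is proved, stated in full; the proofs are below) =====
def Claim_equal_apply_fuzzy_markup_py : Prop := ∀ (search_term : String) (parent_name : String) (name : String), Dom_apply_fuzzy_markup_py search_term parent_name name → Spec_apply_fuzzy_markup_py search_term parent_name name (apply_fuzzy_markup_py search_term parent_name name)

-- ===== LEMMAS AND PROOFS =====

-- common recursive description of one marked-up character run
def renderSpec (st : List Char) : Nat → List Char → (List (List Char) × Nat)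
  | _, [] => ([], 0)
  | i, c :: rest =>
    if st[i]? = some (PySem.Chars.lowerChar c) then
      let r := renderSpec st (i + 1) rest
      (pvMarkupA c :: r.1, r.2 + 1)
    else
      let r := renderSpec st i rest
      ([c] :: r.1, r.2)

-- the new indices pass 1 appends, as a pure recursion
def collectNew (st : List Char) : Nat → List Char → Int → List Int
  | _, [], _ => []
  | i, c :: rest, idx =>
    if st[i]? = some (PySem.Chars.lowerChar c) then
      idx :: collectNew st (i + 1) rest (idx + 1)
    else
      collectNew st i rest (idx + 1)

theorem markLoopA_eq (st : List Char) :
    ∀ (nm : List Char) (i n : Nat) (res : List (List Char)),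
      pvMarkLoopA st nm i n res = (res ++ (renderSpec st i nm).1, n + (renderSpec st i nm).2) := by
  intro nm
  induction nm with
  | nil => intro i n res; simp [pvMarkLoopA, renderSpec]
  | cons c rest ih =>
    intro i n res
    by_cases h : st[i]? = some (PySem.Chars.lowerChar c)
    · simp [pvMarkLoopA, renderSpec, h, ih]; omega
    · simp [pvMarkLoopA, renderSpec, h, ih]

theorem collectB_eq (needle : List Char) :
    ∀ (nm : List Char) (idx : Int) (acc : List Int),
      pvCollectB needle nm idx acc = acc ++ collectNew needle acc.length nm idx := by
  intro nm
  induction nm with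
  | nil => intro idx acc; simp [pvCollectB, collectNew]
  | cons c rest ih =>
    intro idx acc
    by_cases h : needle[acc.length]? = some (PySem.Chars.lowerChar c)
    · simp [pvCollectB, collectNew, h, ih]
    · simp [pvCollectB, collectNew, h, ih]

theorem collectNew_length (st : List Char) :
    ∀ (nm : List Char) (i : Nat) (idx : Int),
      (collectNew st i nm idx).length = (renderSpec st i nm).2 := by
  intro nm
  induction nm with
  | nil => intro i idx; simp [collectNew, renderSpec]
  | cons c rest ih =>
    intro i idx
    by_cases h : st[i]? = some (PySem.Chars.lowerChar c)
    · simp [collectNew, renderSpec, h, ih]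
    · simp [collectNew, renderSpec, h, ih]

theorem collectNew_lb (st : List Char) :
    ∀ (nm : List Char) (i : Nat) (idx : Int), ∀ j ∈ collectNew st i nm idx, idx ≤ j := by
  intro nm
  induction nm with
  | nil => intro i idx j hj; simp [collectNew] at hj
  | cons c rest ih =>
    intro i idx j hj
    by_cases h : st[i]? = some (PySem.Chars.lowerChar c)
    · simp [collectNew, h] at hj
      rcases hj with rfl | hj
      · exact le_refl _
      · have := ih (i + 1) (idx + 1) j hj; omega
    · simp [collectNew, h] at hj
      have := ih i (idx + 1) j hj; omega

theorem renderB_eq (st : List Char) :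
    ∀ (nm : List Char) (i : Nat) (idx : Int) (H : List Int),
      (∀ j, idx ≤ j → (j ∈ H ↔ j ∈ collectNew st i nm idx)) →
      (PySem.List.enumerate nm idx).map
        (fun p => if PySem.Set.contains H p.1 then "[underline bold]".toList ++ [p.2] ++ "[/]".toList else [p.2])
        = (renderSpec st i nm).1 := by
  intro nm
  induction nm with
  | nil => intro i idx H _; simp [renderSpec]
  | cons c rest ih =>
    intro i idx H hH
    by_cases h : st[i]? = some (PySem.Chars.lowerChar c)
    · have hmem : idx ∈ H := by
        rw [hH idx (le_refl idx)]
        simp [collectNew, h]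
      have hc : PySem.Set.contains H idx = true := by
        rw [PySem.Set.contains_iff]; exact hmem
      simp only [PySem.List.enumerate_cons, List.map_cons, hc]
      rw [renderSpec]
      simp only [h, pvMarkupA, if_true]
      rw [List.cons_eq_cons]
      refine ⟨rfl, ?_⟩
      apply ih (i + 1) (idx + 1) H
      intro j hj
      rw [hH j (by omega)]
      constructor
      · intro hjc
        rw [collectNew] at hjc
        simp [h] at hjc
        rcases hjc with rfl | hjc
        · omega
        · exact hjc
      · intro hjc
        rw [collectNew]
        simp [h]
        right; exact hjc
    · have hnmem : idx ∉ H := by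
        intro hcon
        rw [hH idx (le_refl idx)] at hcon
        rw [collectNew] at hcon
        simp [h] at hcon
        have := collectNew_lb st rest i (idx + 1) idx hcon
        omega
      have hc : PySem.Set.contains H idx = false := by
        rw [← Bool.not_eq_true, PySem.Set.contains_iff]; exact hnmem
      simp only [PySem.List.enumerate_cons, List.map_cons, hc, Bool.false_eq_true, if_false]
      rw [renderSpec]
      simp only [h, if_false]
      rw [List.cons_eq_cons]
      refine ⟨rfl, ?_⟩
      apply ih i (idx + 1) H
      intro j hj
      rw [hH j (by omega)]
      rw [collectNew]
      simp [h]

theorem collectNew_nodup (st : List Char) :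
    ∀ (nm : List Char) (i : Nat) (idx : Int), (collectNew st i nm idx).Nodup := by
  intro nm
  induction nm with
  | nil => intro i idx; simp [collectNew]
  | cons c rest ih =>
    intro i idx
    by_cases h : st[i]? = some (PySem.Chars.lowerChar c)
    · rw [collectNew]
      simp only [h]
      refine List.Nodup.cons ?_ (ih (i + 1) (idx + 1))
      intro hmem
      have := collectNew_lb st rest (i + 1) (idx + 1) idx hmem
      omega
    · rw [collectNew]
      simp only [h]
      exact ih i (idx + 1)

theorem core_eq (st nm : List Char) :
    (if (pvMarkLoopA (PySem.Chars.replace (PySem.Chars.lower st) [' '] []) nm 0 0 []).2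
        = (PySem.Chars.replace (PySem.Chars.lower st) [' '] []).length then
       some (String.ofList (PySem.Chars.join []
         (pvMarkLoopA (PySem.Chars.replace (PySem.Chars.lower st) [' '] []) nm 0 0 []).1))
     else none) = pvCoreB st nm := by
  set needle := PySem.Chars.replace (PySem.Chars.lower st) [' '] [] with hneedle
  rw [pvCoreB]
  rw [markLoopA_eq]
  have hcol : pvCollectB needle nm 0 [] = collectNew needle 0 nm 0 := by
    rw [collectB_eq]; simp
  simp only [← hneedle, hcol]
  rw [collectNew_length]
  by_cases hlen : (renderSpec needle 0 nm).2 = needle.length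
  · simp only [hlen, zero_add, List.nil_append]
    have hset : PySem.Set.ofList (collectNew needle 0 nm 0) = collectNew needle 0 nm 0 :=
      PySem.Set.ofList_eq_self_of_nodup _ (collectNew_nodup needle nm 0 0)
    rw [hset]
    rw [renderB_eq needle nm 0 0 (collectNew needle 0 nm 0) (fun j _ => Iff.rfl)]
  · simp [hlen]

theorem fuzzy_loop_eq (st : List Char) :
    ∀ (nm : List Char) (i : Nat), i < st.length →
      pvFuzzyLoopA st nm i = pvMatchesB (st.drop i) nm := by
  intro nm
  induction nm with
  | nil =>
    intro i hi
    rw [pvFuzzyLoopA]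
    rcases h : st.drop i with _ | ⟨c, r⟩
    · have : st.length ≤ i := by
        have := List.drop_eq_nil_iff.mp h; omega
      omega
    · rw [pvMatchesB]; simp [pvConsume]
  | cons c rest ih =>
    intro i hi
    rcases h : st.drop i with _ | ⟨s0, s'⟩
    · have := List.drop_eq_nil_iff.mp h; omega
    · have hs0 : st[i]? = some s0 := by
        have : st[i]? = (st.drop i)[0]? := by
          simp [List.getElem?_drop]
        rw [this, h]; rfl
      have hdd : st.drop (i + 1) = s' := by
        rw [← List.tail_drop, h]
        rfl
      by_cases hm : s0 = c
      · subst hm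
        rw [pvFuzzyLoopA, if_pos hs0]
        by_cases hend : i + 1 = st.length
        · have hs' : s' = [] := by
            have : st.drop (i + 1) = [] := List.drop_eq_nil_iff.mpr (by omega)
            rw [hdd] at this; exact this
          rw [if_pos hend, hs']
          simp [pvMatchesB, pvConsume]
        · rw [if_neg hend]
          have hi1 : i + 1 < st.length := by omega
          rw [ih (i + 1) hi1, hdd]
          simp [pvMatchesB, pvConsume]
      · have hm' : ¬ (c = s0) := fun hh => hm hh.symm
        rw [pvFuzzyLoopA, if_neg (by rw [hs0]; simp [hm])]
        rw [ih i hi, h]  -- note: rcases already rewrote the RHS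
        simp only [pvMatchesB, pvConsume, if_neg hm']

theorem fuzzy_eq (p nm : List Char) :
    is_fuzzy_match_py p nm = matches_b p nm := by
  rw [is_fuzzy_match_py, matches_b]
  by_cases hp : p.isEmpty
  · have : p = [] := List.isEmpty_iff.mp hp
    subst this
    simp [PySem.Chars.lower, pvMatchesB]
  · simp only [hp, Bool.false_eq_true, if_false]
    have hlen : (PySem.Chars.lower p).length = p.length := by
      simp [PySem.Chars.lower]
    have hpe : ¬ (PySem.Chars.lower p).isEmpty := by
      rw [List.isEmpty_iff] at hp ⊢
      intro hcon
      apply hp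
      have := congrArg List.length hcon
      rw [hlen] at this
      exact List.length_eq_zero_iff.mp this
    simp only [hpe, Bool.false_eq_true, if_false]
    have hpos : 0 < (PySem.Chars.lower p).length := by
      rw [List.isEmpty_iff] at hpe
      cases hq : PySem.Chars.lower p with
      | nil => exact absurd hq hpe
      | cons a b => simp
    rw [fuzzy_loop_eq _ _ 0 hpos]
    simp

-- ===== VERDICT (by name: the statement is the Claim_ definition above) =====
theorem apply_fuzzy_markup_py_spec : Claim_equal_apply_fuzzy_markup_py := by
  intro search_term parent_name name _
  unfold Spec_apply_fuzzy_markup_py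
  rw [apply_fuzzy_markup_py, apply_fuzzy_markup_py_alt]
  by_cases hempty : search_term.toList = []
  · simp [hempty]
  · simp only [hempty, if_false]
    by_cases hslash : PySem.Chars.isIn ['/'] search_term.toList = true
    · simp only [hslash, if_true]
      rcases hsp : PySem.Chars.splitMax? search_term.toList ['/'] 1 with _ | ⟨_ | ⟨p, _ | ⟨s, r⟩⟩⟩
      · simp [core_eq]
      · simp [core_eq]
      · simp [core_eq]
      · dsimp only
        simp only [fuzzy_eq]
        by_cases hg : (!parent_name.toList.isEmpty && !p.isEmpty && !(matches_b p parent_name.toList)) = true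
        · simp [hg]
        · simp only [hg, Bool.false_eq_true, if_false]
          simp at hg ⊢
          exact core_eq s name.toList
    · simp only [hslash, Bool.false_eq_true, if_false]
      exact core_eq search_term.toList name.toList
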